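-- pv_equiv track=rewrite | github.com/queelius/repoindex | repoindex/tags.py | match_hierarchical_tag
-- ===== SOURCE A (Python) =====
-- from typing import Dict, List, Tuple, Optional, Any
--
-- def parse_tag(tag: str) -> Tuple[str, Optional[str]]:
--     """
--     Parse a tag into key and optional value.
--
--     Args:
--         tag: Tag string (e.g., "org:torvalds" or "deprecated")
--
--     Returns:
--         Tuple of (key, value) where value may be None
--     """
--     if ':' in tag:
--         parts = tag.split(':', 1)
--         return (parts[0], parts[1])
--     return (tag, None)
--
-- def parse_hierarchical_tag(tag: str) -> Tuple[str, List[str]]: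
--     """
--     Parse a hierarchical tag into key and hierarchy levels.
--
--     Args:
--         tag: Tag string (e.g., "topic:scientific/engineering/ai")
--
--     Returns:
--         Tuple of (key, hierarchy_levels)
--     """
--     key, value = parse_tag(tag)
--     if value and '/' in value:
--         levels = value.split('/')
--         return (key, levels)
--     return (key, [value] if value else [])
--
-- def match_hierarchical_tag(tag: str, pattern: str) -> bool:
--     """
--     Check if a hierarchical tag matches a pattern.
--
--     Args:
--         tag: Tag to check (e.g., "topic:scientific/engineering/ai")
--         pattern: Pattern to match (e.g., "topic:scientific/*" or "topic:scientific")
--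
--     Returns:
--         True if tag matches the pattern
--     """
--     tag_key, tag_levels = parse_hierarchical_tag(tag)
--     pattern_key, pattern_levels = parse_hierarchical_tag(pattern)
--
--     # Keys must match
--     if tag_key != pattern_key:
--         return False
--
--     # If pattern has no value, it matches any value with that key
--     if not pattern_levels or pattern_levels == [None]:
--         return True
--
--     # Check each level
--     for i, pattern_level in enumerate(pattern_levels):
--         if pattern_level == '*':
--             # Wildcard matches rest of hierarchy
--             return True
--         if i >= len(tag_levels):
--             # Pattern has more levels than tag
--             return False
--         if pattern_level != tag_levels[i]:
--             return False
--
--     # Exact match if pattern has same or fewer levels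
--     return True
-- ===== SOURCE B (Python) =====
-- def _walk(p: str, t: str) -> bool:
--     # Lockstep descent over the raw value strings: p and t each stand for a
--     # non-empty list of levels; compare one level and recurse on the rests.
--     if p == '*' or p.startswith('*/'):
--         return True
--     i = p.find('/')
--     j = t.find('/')
--     phead = p if i < 0 else p[:i]
--     thead = t if j < 0 else t[:j]
--     if phead != thead:
--         return False
--     if i < 0:
--         # pattern exhausted: it is a prefix of the tag
--         return True
--     if j < 0:
--         # tag exhausted: only an immediate wildcard level still matches
--         rest = p[i + 1:]
--         return rest == '*' or rest.startswith('*/')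
--     return _walk(p[i + 1:], t[j + 1:])
--
--
-- def match_hierarchical_tag(tag: str, pattern: str) -> bool:
--     c = tag.find(':')
--     tkey, tval = (tag, '') if c < 0 else (tag[:c], tag[c + 1:])
--     d = pattern.find(':')
--     pkey, pval = (pattern, '') if d < 0 else (pattern[:d], pattern[d + 1:])
--     if tkey != pkey:
--         return False
--     if not pval:
--         return True
--     if not tval:
--         # tag has no value: only a leading wildcard level matches
--         return pval == '*' or pval.startswith('*/')
--     return _walk(pval, tval)
-- ===== Notes on version B (the rewrite author's own statement) =====
-- stated objective: alternative
-- what changed: B never builds level lists: instead of A's parse-into-lists pass (split on ':' then '/') followed by an enumerate loop with indexed lookups, B does a single recursive lockstep descent over the two raw value strings, peeling one '/'-delimited level per step with find/startswith and recursing on the remainders.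
import Mathlib
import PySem

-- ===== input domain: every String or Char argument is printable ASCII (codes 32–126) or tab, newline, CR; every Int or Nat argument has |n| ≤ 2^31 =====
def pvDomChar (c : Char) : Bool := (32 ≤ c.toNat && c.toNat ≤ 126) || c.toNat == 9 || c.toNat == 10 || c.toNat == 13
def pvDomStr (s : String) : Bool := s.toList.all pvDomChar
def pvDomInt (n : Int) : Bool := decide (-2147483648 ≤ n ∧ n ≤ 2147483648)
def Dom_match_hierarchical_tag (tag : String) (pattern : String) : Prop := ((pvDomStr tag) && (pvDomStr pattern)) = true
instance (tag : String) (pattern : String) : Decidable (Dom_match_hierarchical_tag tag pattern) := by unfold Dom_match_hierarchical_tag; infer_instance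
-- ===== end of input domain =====

-- B replaces A's two-stage algorithm (parse both strings into level lists, then an
-- enumerate loop with indexed lookups) by a single recursive lockstep descent over
-- the raw value strings that never builds a level list (objective: alternative).

-- ===== PORT A =====
-- helper: parse_tag
def pyParseTag (tag : String) : String × Option String :=
  if PySem.Str.isIn ":" tag then
    match PySem.Str.splitMax? tag ":" 1 with
    | some (k :: v :: _) => (k, some v)
    | _ => (tag, none)   -- unreachable: ':' in tag gives two parts
  else (tag, none)

-- helper: parse_hierarchical_tag
def pyParseHier (tag : String) : String × List (Option String) :=
  match pyParseTag tag with
  | (key, some v) =>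
    if v ≠ "" && PySem.Str.isIn "/" v then
      (key, ((PySem.Str.split? v "/").getD []).map some)
    else if v ≠ "" then (key, [some v]) else (key, [])
  | (key, none) => (key, [])

-- A's per-level loop: for i, pattern_level in enumerate(pattern_levels): …
def pyMatchLevels : List (Option String) → List (Option String) → Nat → Bool
  | [], _, _ => true
  | p :: rest, tl, i =>
    if p = some "*" then true
    else if tl.length ≤ i then false
    else if ¬ (PySem.List.pyGet? tl (i : Int) = some p) then false
    else pyMatchLevels rest tl (i + 1)

def match_hierarchical_tag (tag : String) (pattern : String) : Bool :=
  let t := pyParseHier tag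
  let pt := pyParseHier pattern
  if t.1 ≠ pt.1 then false
  else if pt.2.isEmpty || pt.2 == [none] then true
  else pyMatchLevels pt.2 t.2 0

-- ===== PORT B =====
-- Source B's _walk: lockstep descent over the two raw value strings (as char lists)
def walkB (p t : List Char) : Bool :=
  if p = "*".toList || PySem.Chars.startswith p "*/".toList then true
  else
    let i := PySem.Chars.find p "/".toList
    let j := PySem.Chars.find t "/".toList
    let phead := if i < 0 then p else PySem.List.slice p none (some i)
    let thead := if j < 0 then t else PySem.List.slice t none (some j)
    if phead ≠ thead then false
    else if i < 0 then true
    else if j < 0 then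
      let rest := PySem.List.slice p (some (i + 1)) none
      rest = "*".toList || PySem.Chars.startswith rest "*/".toList
    else walkB (PySem.List.slice p (some (i + 1)) none) (PySem.List.slice t (some (j + 1)) none)
termination_by p.length
decreasing_by
  have h0 : (0:Int) ≤ i := by omega
  have hne : p ≠ [] := by
    intro hp
    have : ("/".toList : List Char) <:+: p := (PySem.Chars.find_nonneg_iff p _).mp h0
    subst hp; simp [List.infix_nil] at this
  rw [PySem.List.slice_from p (by omega : (0:Int) ≤ i + 1)]
  have : 0 < p.length := List.length_pos_of_ne_nil hne
  simp only [List.length_drop]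
  omega

def match_hierarchical_tag_alt (tag : String) (pattern : String) : Bool :=
  let tl := tag.toList
  let pl := pattern.toList
  let c := PySem.Chars.find tl ":".toList
  let tkey := if c < 0 then tl else PySem.List.slice tl none (some c)
  let tval := if c < 0 then ([] : List Char) else PySem.List.slice tl (some (c + 1)) none
  let d := PySem.Chars.find pl ":".toList
  let pkey := if d < 0 then pl else PySem.List.slice pl none (some d)
  let pval := if d < 0 then ([] : List Char) else PySem.List.slice pl (some (d + 1)) none
  if tkey ≠ pkey then false
  else if pval = [] then true
  else if tval = [] then pval = "*".toList || PySem.Chars.startswith pval "*/".toList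
  else walkB pval tval

-- ===== PRECONDITION & SPEC =====
def Spec_match_hierarchical_tag (tag : String) (pattern : String) (out : Bool) : Prop := out = match_hierarchical_tag_alt tag pattern
instance (tag : String) (pattern : String) (out : Bool) : Decidable (Spec_match_hierarchical_tag tag pattern out) := by unfold Spec_match_hierarchical_tag; infer_instance

-- ===== CLAIM (what is proved, stated in full; the proofs are below) =====
def Claim_equal_match_hierarchical_tag : Prop := ∀ (tag : String) (pattern : String), Dom_match_hierarchical_tag tag pattern → Spec_match_hierarchical_tag tag pattern (match_hierarchical_tag tag pattern)

-- ===== LEMMAS AND PROOFS =====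

-- proof-side structural split helpers
def splitFirst (sep : Char) : List Char → Option (List Char × List Char)
  | [] => none
  | c :: r => if c = sep then some ([], r) else (splitFirst sep r).map (fun ab => (c :: ab.1, ab.2))

def mySplit (sep : Char) : List Char → List (List Char)
  | [] => [[]]
  | c :: r =>
    if c = sep then [] :: mySplit sep r
    else
      match mySplit sep r with
      | h :: tl => (c :: h) :: tl
      | [] => [[c]]

theorem mySplit_ne_nil (sep : Char) (l : List Char) : mySplit sep l ≠ [] := by
  induction l with
  | nil => simp [mySplit]
  | cons c r ih =>
    simp only [mySplit]
    split_ifs with h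
    · simp
    · cases hm : mySplit sep r with
      | nil => simp
      | cons h t => simp

theorem splitFirst_none_iff (sep : Char) (l : List Char) : splitFirst sep l = none ↔ sep ∉ l := by
  induction l with
  | nil => simp [splitFirst]
  | cons c r ih =>
    simp only [splitFirst]
    split_ifs with h
    · subst h; simp
    · cases hs : splitFirst sep r with
      | none => simp [Option.map_none]; constructor <;> intro <;> simp_all [ih.mp hs, Ne.symm h]
      | some ab =>
        have : sep ∈ r := by
          by_contra hni
          rw [ih.mpr hni] at hs; cases hs
        simp [Option.map_some, this, Ne.symm h]

theorem splitFirst_some_spec (sep : Char) : ∀ (l a b : List Char), splitFirst sep l = some (a, b) → l = a ++ sep :: b ∧ sep ∉ a := by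
  intro l
  induction l with
  | nil => intro a b h; simp [splitFirst] at h
  | cons c r ih =>
    intro a b h
    simp only [splitFirst] at h
    split_ifs at h with hc
    · subst hc
      obtain ⟨rfl, rfl⟩ : ([] = a ∧ r = b) := by
        simpa [Prod.ext_iff, eq_comm] using h
      simp
    · cases hs : splitFirst sep r with
      | none => rw [hs] at h; simp at h
      | some ab =>
        rw [hs] at h
        simp only [Option.map_some, Option.some.injEq] at h
        obtain ⟨a', b'⟩ := ab
        obtain ⟨h1, h2⟩ := Prod.mk.injEq .. ▸ h
        obtain ⟨hl, hn⟩ := ih a' b' hs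
        subst hl
        constructor
        · rw [← h1, ← h2]; simp
        · rw [← h1]; simp [hn, Ne.symm hc]

theorem mySplit_eq_splitFirst (sep : Char) : ∀ l : List Char, mySplit sep l =
    (match splitFirst sep l with
     | none => [l]
     | some (a, b) => a :: mySplit sep b) := by
  intro l
  induction l with
  | nil => simp [mySplit, splitFirst]
  | cons c r ih =>
    simp only [mySplit, splitFirst]
    split_ifs with h
    · simp
    · cases hs : splitFirst sep r with
      | none => rw [ih, hs]; simp
      | some ab =>
        obtain ⟨a, b⟩ := ab
        rw [ih, hs]; simp

theorem findgo_splitFirst (sep : Char) : ∀ (l : List Char) (k : Nat), PySem.Chars.find.go [sep] l k =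
    (match splitFirst sep l with
     | none => -1
     | some (a, _) => (k : Int) + a.length) := by
  intro l
  induction l with
  | nil => intro k; simp [PySem.Chars.find.go, splitFirst]
  | cons c r ih =>
    intro k
    rw [PySem.Chars.find.go]
    by_cases h : c = sep
    · subst h
      simp [List.isPrefixOf, splitFirst]
    · have hpre : [sep].isPrefixOf (c :: r) = false := by
        simp [List.isPrefixOf, Ne.symm h, BEq.comm]
      rw [hpre]
      simp only [Bool.false_eq_true, if_false, ih (k+1), splitFirst, if_neg h]
      cases hs : splitFirst sep r with
      | none => simp
      | some ab => obtain ⟨a, b⟩ := ab; simp; push_cast; ring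

theorem find_splitFirst (sep : Char) (l : List Char) : PySem.Chars.find l [sep] =
    (match splitFirst sep l with
     | none => -1
     | some (a, _) => (a.length : Int)) := by
  rw [PySem.Chars.find, findgo_splitFirst]
  cases splitFirst sep l with
  | none => rfl
  | some ab => simp

theorem splitOnMaxGo_zero (sep : Char) (fuel : Nat) (l cur : List Char) (acc : List (List Char)) :
    PySem.Chars.splitOnMax.go [sep] fuel 0 l cur acc = acc.reverse ++ [cur.reverse ++ l] := by
  cases fuel with
  | zero => simp [PySem.Chars.splitOnMax.go]
  | succ n =>
    cases l with
    | nil => simp [PySem.Chars.splitOnMax.go]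
    | cons c r => rw [PySem.Chars.splitOnMax.go]; simp

theorem splitOnGo_mySplit (sep : Char) : ∀ (fuel : Nat) (l cur : List Char) (acc : List (List Char)),
    l.length ≤ fuel →
    PySem.Chars.splitOn.go [sep] fuel l cur acc =
      acc.reverse ++ (cur.reverse ++ (mySplit sep l).headI) :: (mySplit sep l).tail := by
  intro fuel
  induction fuel with
  | zero =>
    intro l cur acc h
    have : l = [] := List.length_eq_zero_iff.mp (Nat.le_zero.mp h)
    subst this
    simp [PySem.Chars.splitOn.go, mySplit]
  | succ n ih =>
    intro l cur acc h
    cases l with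
    | nil => simp [PySem.Chars.splitOn.go, mySplit]
    | cons c r =>
      rw [PySem.Chars.splitOn.go]
      by_cases hc : c = sep
      · subst hc
        have hpre : [c].isPrefixOf (c :: r) = true := by simp [List.isPrefixOf]
        rw [hpre]
        simp only [List.length_singleton, List.drop_one, List.tail_cons, List.reverse_nil]
        rw [ih r [] (cur.reverse :: acc) (by simpa using Nat.lt_succ_iff.mp (by simpa using h))]
        simp only [mySplit, if_pos rfl, List.reverse_nil, List.nil_append, List.headI_cons,
          List.tail_cons, List.reverse_cons, List.append_assoc, List.singleton_append]
        cases hm : mySplit c r with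
        | nil => exact absurd hm (mySplit_ne_nil c r)
        | cons hh tt => simp
      · have hpre : [sep].isPrefixOf (c :: r) = false := by simp [List.isPrefixOf, Ne.symm hc]
        rw [hpre]
        simp only [Bool.false_eq_true, if_false]
        rw [ih r (c :: cur) acc (by simpa using Nat.lt_succ_iff.mp (by simpa using h))]
        simp only [mySplit, if_neg hc]
        cases hm : mySplit sep r with
        | nil => exact absurd hm (mySplit_ne_nil sep r)
        | cons hh tt => simp

theorem splitOn_eq_mySplit (sep : Char) (l : List Char) :
    PySem.Chars.splitOn l [sep] = mySplit sep l := by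
  rw [PySem.Chars.splitOn, splitOnGo_mySplit sep (l.length + 1) l [] [] (by omega)]
  cases hm : mySplit sep l with
  | nil => exact absurd hm (mySplit_ne_nil sep l)
  | cons h t => simp

theorem splitOnMaxGo_one (sep : Char) : ∀ (fuel : Nat) (l cur : List Char) (acc : List (List Char)),
    l.length ≤ fuel →
    PySem.Chars.splitOnMax.go [sep] fuel 1 l cur acc =
      acc.reverse ++ (match splitFirst sep l with
        | none => [cur.reverse ++ l]
        | some (a, b) => [cur.reverse ++ a, b]) := by
  intro fuel
  induction fuel with
  | zero =>
    intro l cur acc h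
    have : l = [] := List.length_eq_zero_iff.mp (Nat.le_zero.mp h)
    subst this
    simp [PySem.Chars.splitOnMax.go, splitFirst]
  | succ n ih =>
    intro l cur acc h
    cases l with
    | nil => simp [PySem.Chars.splitOnMax.go, splitFirst]
    | cons c r =>
      rw [PySem.Chars.splitOnMax.go]
      by_cases hc : c = sep
      · subst hc
        have hpre : [c].isPrefixOf (c :: r) = true := by simp [List.isPrefixOf]
        rw [if_neg (by omega), hpre]
        simp only [if_true, List.length_singleton, List.drop_one, List.tail_cons]
        rw [splitOnMaxGo_zero]
        simp [splitFirst]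
      · have hpre : [sep].isPrefixOf (c :: r) = false := by simp [List.isPrefixOf, Ne.symm hc]
        rw [if_neg (by omega), hpre]
        simp only [Bool.false_eq_true, if_false]
        rw [ih r (c :: cur) acc (by simpa using Nat.lt_succ_iff.mp (by simpa using h))]
        simp only [splitFirst, if_neg hc]
        cases hs : splitFirst sep r with
        | none => simp
        | some ab => obtain ⟨a, b⟩ := ab; simp

-- characterizations of the two string-level parses
theorem parseTag_char (tag : String) : pyParseTag tag =
    (match splitFirst ':' tag.toList with
     | none => (tag, none)
     | some (a, b) => (String.ofList a, some (String.ofList b))) := by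
  unfold pyParseTag
  have hIn : PySem.Str.isIn ":" tag = PySem.Chars.isIn [':'] tag.toList := rfl
  rw [hIn, PySem.Chars.isIn, find_splitFirst]
  cases hs : splitFirst ':' tag.toList with
  | none => simp
  | some ab =>
    obtain ⟨a, b⟩ := ab
    have hne : ((a.length : Int) != -1) = true := by simp
    simp only [hne, if_true]
    have hsm : PySem.Str.splitMax? tag ":" 1 = some [String.ofList a, String.ofList b] := by
      rw [PySem.Str.splitMax?]
      have : PySem.Chars.splitMax? tag.toList ":".toList 1 = some [a, b] := by
        rw [PySem.Chars.splitMax?]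
        have h1 : (":".toList : List Char) = [':'] := rfl
        rw [h1]
        simp only [List.isEmpty_cons, if_false]
        rw [PySem.Chars.splitOnMax, if_neg (by decide)]
        have := splitOnMaxGo_one ':' (tag.toList.length + 1) tag.toList [] [] (by omega)
        rw [show ((1:Int).toNat) = 1 from rfl, this, hs]
        simp
      rw [this]
      simp
    rw [hsm]

def levelsMap (b : List Char) : List (Option String) :=
  (mySplit '/' b).map (fun cs => some (String.ofList cs))

def levelsOf (b : List Char) : List (Option String) :=
  if b = [] then [] else levelsMap b

theorem parseHier_char (s : String) : pyParseHier s =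
    (match splitFirst ':' s.toList with
     | none => (s, [])
     | some (a, b) => (String.ofList a, levelsOf b)) := by
  unfold pyParseHier
  rw [parseTag_char]
  cases hs : splitFirst ':' s.toList with
  | none => simp
  | some ab =>
    obtain ⟨a, b⟩ := ab
    simp only
    have htl : (String.ofList b).toList = b := by simp
    have hempty : (String.ofList b = "") ↔ b = [] := by rw [String.ext_iff]; simp
    have hIn : PySem.Str.isIn "/" (String.ofList b) = PySem.Chars.isIn ['/'] b := by
      rw [PySem.Str.isIn, htl]; rfl
    by_cases hb : b = []
    · subst hb
      simp [hempty, levelsOf]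
    · cases hsf : splitFirst '/' b with
      | none =>
        have hfind : PySem.Chars.isIn ['/'] b = false := by
          rw [PySem.Chars.isIn, find_splitFirst, hsf]; simp
        have hcond : ((String.ofList b ≠ "") && PySem.Str.isIn "/" (String.ofList b)) = false := by
          rw [hIn, hfind]; simp
        rw [hcond]
        simp only [Bool.false_eq_true, if_false, hempty]
        rw [if_pos (by simpa [hempty] using hb)]
        rw [levelsOf, if_neg hb, levelsMap, mySplit_eq_splitFirst, hsf]
        simp
      | some ab' =>
        obtain ⟨a', b'⟩ := ab'
        have hfind : PySem.Chars.isIn ['/'] b = true := by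
          rw [PySem.Chars.isIn, find_splitFirst, hsf]; simp
        have hcond : ((String.ofList b ≠ "") && PySem.Str.isIn "/" (String.ofList b)) = true := by
          rw [hIn, hfind, Bool.and_true]
          simpa [hempty] using hb
        rw [hcond]
        simp only [if_true]
        have hsplit : PySem.Str.split? (String.ofList b) "/" =
            some ((mySplit '/' b).map String.ofList) := by
          rw [PySem.Str.split?, PySem.Chars.split?, htl]
          have h1 : ("/".toList : List Char) = ['/'] := rfl
          rw [h1]
          simp only [List.isEmpty_cons, if_false]
          rw [splitOn_eq_mySplit]
          simp
        rw [hsplit, levelsOf, if_neg hb, levelsMap]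
        simp [Function.comp]

-- the head level of a value string
def headLevel (l : List Char) : List Char :=
  match splitFirst '/' l with
  | none => l
  | some (a, _) => a

theorem star_iff (p : List Char) :
    ((p = "*".toList || PySem.Chars.startswith p "*/".toList) = true) ↔ headLevel p = ['*'] := by
  have h1 : ("*".toList : List Char) = ['*'] := rfl
  have h2 : ("*/".toList : List Char) = ['*', '/'] := rfl
  rw [h1, h2, headLevel]
  cases hs : splitFirst '/' p with
  | none =>
    have hnot : '/' ∉ p := (splitFirst_none_iff '/' p).mp hs
    have hsw : PySem.Chars.startswith p ['*', '/'] = false := by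
      rw [PySem.Chars.startswith]
      by_contra hcon
      have : ['*', '/'] <+: p := by
        rw [← List.isPrefixOf_iff_prefix]
        simpa using hcon
      exact hnot (this.subset (by simp))
    simp [hsw]
  | some ab =>
    obtain ⟨a, b⟩ := ab
    obtain ⟨hp, hna⟩ := splitFirst_some_spec '/' p a b hs
    have hpn : p ≠ ['*'] := by
      intro hcon
      have : '/' ∈ p := by rw [hp]; simp
      rw [hcon] at this
      simp at this
    have hsw : (PySem.Chars.startswith p ['*', '/'] = true) ↔ a = ['*'] := by
      rw [PySem.Chars.startswith, List.isPrefixOf_iff_prefix]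
      constructor
      · intro hpre
        obtain ⟨t, ht⟩ := hpre
        rw [hp] at ht
        cases a with
        | nil => simp at ht
        | cons x a' =>
          simp only [List.cons_append, List.cons.injEq] at ht
          obtain ⟨hx, ht2⟩ := ht
          cases a' with
          | nil => rw [← hx]
          | cons y a'' =>
            simp only [List.cons_append, List.cons.injEq] at ht2
            exact absurd (by rw [ht2.1]; simp : '/' ∈ x :: y :: a'') hna
      · rintro rfl
        exact ⟨b, by simpa using hp.symm⟩
    simp only [Bool.or_eq_true, decide_eq_true_eq]
    constructor
    · rintro (h | h)
      · exact absurd h hpn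
      · exact hsw.mp h
    · intro h
      exact Or.inr (hsw.mpr h)

-- structural (suffix) version of A's indexed loop
def pyMatchFrom : List (Option String) → List (Option String) → Bool
  | [], _ => true
  | p :: _, [] => if p = some "*" then true else false
  | p :: rest, t :: ts =>
    if p = some "*" then true
    else if ¬ (t = p) then false else pyMatchFrom rest ts

theorem pyMatchLevels_eq_from (pl : List (Option String)) :
    ∀ (tl : List (Option String)) (i : Nat), pyMatchLevels pl tl i = pyMatchFrom pl (tl.drop i) := by
  induction pl with
  | nil => intro tl i; rfl
  | cons p rest ih =>
    intro tl i
    by_cases hstar : p = some "*"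
    · rcases hdrop : tl.drop i with _ | ⟨t, ts⟩ <;>
        simp [pyMatchLevels, pyMatchFrom, hstar]
    · by_cases hlen : tl.length ≤ i
      · have hd : tl.drop i = [] := List.drop_eq_nil_of_le hlen
        simp [pyMatchLevels, pyMatchFrom, hstar, hlen, hd]
      · have hi : i < tl.length := by omega
        have hd : tl.drop i = tl[i] :: tl.drop (i + 1) := List.drop_eq_getElem_cons hi
        have hget : PySem.List.pyGet? tl (i : Int) = tl[i]? := PySem.List.pyGet?_natCast tl i
        rw [pyMatchLevels, if_neg hstar, if_neg hlen, hget, List.getElem?_eq_getElem hi, hd,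
          pyMatchFrom, if_neg hstar]
        by_cases heq : tl[i] = p
        · simp [heq, ih]
        · simp [heq]

theorem pyMatchFrom_star (r tl : List (Option String)) : pyMatchFrom (some "*" :: r) tl = true := by
  cases tl <;> simp [pyMatchFrom]

theorem ofList_star : String.ofList ['*'] = "*" := rfl

theorem ofList_inj (a b : List Char) : (String.ofList a = String.ofList b) ↔ a = b := by
  rw [String.ext_iff]; simp

theorem levelsMap_cons (b : List Char) :
    levelsMap b = some (String.ofList (headLevel b)) ::
      (match splitFirst '/' b with
       | none => []
       | some (_, b') => levelsMap b') := by
  rw [levelsMap, mySplit_eq_splitFirst, headLevel]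
  cases hs : splitFirst '/' b with
  | none => simp
  | some ab => obtain ⟨a, b'⟩ := ab; simp [levelsMap]

theorem some_ofList_ne_star {l : List Char} (h : l ≠ ['*']) :
    some (String.ofList l) ≠ some "*" := by
  intro hcon
  apply h
  apply (ofList_inj l ['*']).mp
  rw [ofList_star]
  injection hcon

-- B's lockstep descent computes A's loop on the level lists
theorem walkB_eq_from : ∀ (n : Nat) (p t : List Char), p.length < n →
    walkB p t = pyMatchFrom (levelsMap p) (levelsMap t) := by
  intro n
  induction n with
  | zero => intro p t h; omega
  | succ n ih =>
    intro p t h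
    rw [walkB]
    have hslash : ("/".toList : List Char) = ['/'] := rfl
    by_cases hstar : (p = "*".toList || PySem.Chars.startswith p "*/".toList) = true
    · rw [if_pos hstar]
      have hh := (star_iff p).mp hstar
      rw [levelsMap_cons p, hh, ofList_star, pyMatchFrom_star]
    · rw [if_neg hstar]
      have hns : headLevel p ≠ ['*'] := fun hh => hstar ((star_iff p).mpr hh)
      cases hsp : splitFirst '/' p with
      | none =>
        have hhp : headLevel p = p := by rw [headLevel, hsp]
        have hfp : PySem.Chars.find p "/".toList = -1 := by
          rw [hslash, find_splitFirst, hsp]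
        have hnp : some (String.ofList p) ≠ some "*" := some_ofList_ne_star (hhp ▸ hns)
        cases hst : splitFirst '/' t with
        | none =>
          have hft : PySem.Chars.find t "/".toList = -1 := by
            rw [hslash, find_splitFirst, hst]
          rw [levelsMap_cons p, levelsMap_cons t, hsp, hst, hhp]
          have hht : headLevel t = t := by rw [headLevel, hst]
          rw [hht]
          simp only [hfp, hft]
          by_cases hpt : p = t
          · subst hpt
            simp [pyMatchFrom, hnp]
          · have : ¬ (String.ofList t = String.ofList p) := by
              rw [ofList_inj]; exact fun hc => hpt hc.symm
            simp [pyMatchFrom, hnp, hpt, this]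
        | some abt =>
          obtain ⟨at', bt⟩ := abt
          obtain ⟨htd, _⟩ := splitFirst_some_spec '/' t at' bt hst
          have hft : PySem.Chars.find t "/".toList = (at'.length : Int) := by
            rw [hslash, find_splitFirst, hst]
          have hht : headLevel t = at' := by rw [headLevel, hst]
          have hslt : PySem.List.slice t none (some ((at'.length : Int))) = at' := by
            rw [PySem.List.slice_to _ (by omega), Int.toNat_natCast, htd]
            exact List.take_left
          rw [levelsMap_cons p, levelsMap_cons t, hsp, hst, hhp, hht]
          simp only [hfp, hft]
          have hnotlt : ¬ ((at'.length : Int) < 0) := by omega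
          simp only [if_neg hnotlt, hslt]
          by_cases hpt : p = at'
          · subst hpt
            simp [pyMatchFrom, hnp]
          · have : ¬ (String.ofList at' = String.ofList p) := by
              rw [ofList_inj]; exact fun hc => hpt hc.symm
            simp [pyMatchFrom, hnp, hpt, this]
      | some abp =>
        obtain ⟨ap, bp⟩ := abp
        obtain ⟨hpd, _⟩ := splitFirst_some_spec '/' p ap bp hsp
        have hhp : headLevel p = ap := by rw [headLevel, hsp]
        have hfp : PySem.Chars.find p "/".toList = (ap.length : Int) := by
          rw [hslash, find_splitFirst, hsp]
        have hslp : PySem.List.slice p none (some ((ap.length : Int))) = ap := by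
          rw [PySem.List.slice_to _ (by omega), Int.toNat_natCast, hpd]
          exact List.take_left
        have hslp2 : PySem.List.slice p (some ((ap.length : Int) + 1)) none = bp := by
          rw [PySem.List.slice_from _ (by omega)]
          have h1 : (((ap.length : Int)) + 1).toNat = (ap ++ ['/']).length := by
            simp
          rw [h1, hpd, show ap ++ '/' :: bp = (ap ++ ['/']) ++ bp by simp]
          exact List.drop_left
        have hnp : some (String.ofList ap) ≠ some "*" := some_ofList_ne_star (hhp ▸ hns)
        have hnotltp : ¬ ((ap.length : Int) < 0) := by omega
        cases hst : splitFirst '/' t with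
        | none =>
          have hft : PySem.Chars.find t "/".toList = -1 := by
            rw [hslash, find_splitFirst, hst]
          have hht : headLevel t = t := by rw [headLevel, hst]
          rw [levelsMap_cons p, levelsMap_cons t, hsp, hst, hhp, hht]
          simp only [hfp, hft, if_neg hnotltp, hslp]
          by_cases hpt : ap = t
          · subst hpt
            -- both sides become the "next pattern level must be '*'" test
            have hhead := levelsMap_cons bp
            by_cases hbs : (bp = "*".toList || PySem.Chars.startswith bp "*/".toList) = true
            · have hsb := (star_iff bp).mp hbs
              simp [pyMatchFrom, hnp, hhead, hsb, ofList_star, hslp2]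
              simpa using (star_iff bp).mpr hsb
            · have hb' : (bp = "*".toList || PySem.Chars.startswith bp "*/".toList) = false := by
                revert hbs
                cases (bp = "*".toList || PySem.Chars.startswith bp "*/".toList) <;> simp
              have hbns : headLevel bp ≠ ['*'] := fun hh => by
                rw [(star_iff bp).mpr hh] at hb'; cases hb'
              have hnsb : some (String.ofList (headLevel bp)) ≠ some "*" :=
                some_ofList_ne_star hbns
              simp [pyMatchFrom, hnp, hhead, hnsb, hslp2]
              simpa using hb'
          · have : ¬ (String.ofList t = String.ofList ap) := by
              rw [ofList_inj]; exact fun hc => hpt hc.symm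
            simp [pyMatchFrom, hnp, hpt, this]
        | some abt =>
          obtain ⟨at', bt⟩ := abt
          obtain ⟨htd, _⟩ := splitFirst_some_spec '/' t at' bt hst
          have hft : PySem.Chars.find t "/".toList = (at'.length : Int) := by
            rw [hslash, find_splitFirst, hst]
          have hht : headLevel t = at' := by rw [headLevel, hst]
          have hslt : PySem.List.slice t none (some ((at'.length : Int))) = at' := by
            rw [PySem.List.slice_to _ (by omega), Int.toNat_natCast, htd]
            exact List.take_left
          have hslt2 : PySem.List.slice t (some ((at'.length : Int) + 1)) none = bt := by
            rw [PySem.List.slice_from _ (by omega)]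
            have h1 : (((at'.length : Int)) + 1).toNat = (at' ++ ['/']).length := by
              simp
            rw [h1, htd, show at' ++ '/' :: bt = (at' ++ ['/']) ++ bt by simp]
            exact List.drop_left
          have hnotltt : ¬ ((at'.length : Int) < 0) := by omega
          rw [levelsMap_cons p, levelsMap_cons t, hsp, hst, hhp, hht]
          simp only [hfp, hft, if_neg hnotltp, if_neg hnotltt, hslp, hslt, hslp2, hslt2]
          by_cases hpt : ap = at'
          · subst hpt
            have hrec : walkB bp bt = pyMatchFrom (levelsMap bp) (levelsMap bt) := by
              apply ih
              have : p.length = ap.length + 1 + bp.length := by rw [hpd]; simp; omega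
              omega
            simp [pyMatchFrom, hnp, hrec]
          · have : ¬ (String.ofList at' = String.ofList ap) := by
              rw [ofList_inj]; exact fun hc => hpt hc.symm
            simp [pyMatchFrom, hnp, hpt, this]

theorem slice_of_splitFirst (sep : Char) (l a b : List Char) (h : splitFirst sep l = some (a, b)) :
    PySem.List.slice l none (some ((a.length : Int))) = a ∧
      PySem.List.slice l (some ((a.length : Int) + 1)) none = b := by
  obtain ⟨hd, _⟩ := splitFirst_some_spec sep l a b h
  constructor
  · rw [PySem.List.slice_to _ (by omega), Int.toNat_natCast, hd]
    exact List.take_left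
  · rw [PySem.List.slice_from _ (by omega)]
    have h1 : (((a.length : Int)) + 1).toNat = (a ++ [sep]).length := by simp
    rw [h1, hd, show a ++ sep :: b = (a ++ [sep]) ++ b by simp]
    exact List.drop_left

theorem levelsMap_ne_nil (b : List Char) : (levelsMap b).isEmpty = false := by
  rw [levelsMap_cons b]
  rfl

theorem levelsMap_ne_none_singleton (b : List Char) :
    (levelsMap b == [(none : Option String)]) = false := by
  rw [beq_eq_false_iff_ne, levelsMap_cons b]
  intro hcon
  have := List.head_eq_of_cons_eq hcon
  cases this

theorem pyMatchFrom_nil_star (b : List Char) :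
    pyMatchFrom (levelsMap b) [] =
      (b = "*".toList || PySem.Chars.startswith b "*/".toList) := by
  rw [levelsMap_cons b]
  by_cases hbs : (b = "*".toList || PySem.Chars.startswith b "*/".toList) = true
  · have hsb := (star_iff b).mp hbs
    rw [hbs, pyMatchFrom, if_pos (by rw [hsb, ofList_star])]
  · have hb' : (b = "*".toList || PySem.Chars.startswith b "*/".toList) = false := by
      revert hbs
      cases (b = "*".toList || PySem.Chars.startswith b "*/".toList) <;> simp
    have hbns : headLevel b ≠ ['*'] := fun hh => by
      rw [(star_iff b).mpr hh] at hb'; cases hb'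
    rw [hb', pyMatchFrom, if_neg (some_ofList_ne_star hbns)]

-- ===== VERDICT (by name: the statement is the Claim_ definition above) =====
theorem match_hierarchical_tag_spec : Claim_equal_match_hierarchical_tag := by
  unfold Claim_equal_match_hierarchical_tag
  intro tag pattern _
  unfold Spec_match_hierarchical_tag
  unfold match_hierarchical_tag match_hierarchical_tag_alt
  rw [parseHier_char tag, parseHier_char pattern]
  have hcolon : (":".toList : List Char) = [':'] := rfl
  cases hct : splitFirst ':' tag.toList with
  | none =>
    have hf1 : PySem.Chars.find tag.toList [':'] = -1 := by
      rw [find_splitFirst, hct]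
    cases hcp : splitFirst ':' pattern.toList with
    | none =>
      have hf2 : PySem.Chars.find pattern.toList [':'] = -1 := by
        rw [find_splitFirst, hcp]
      have hkiff : (tag = pattern) ↔ (tag.toList = pattern.toList) := String.ext_iff
      by_cases hk : tag.toList = pattern.toList <;>
        simp only [hcolon, hf1, hf2] <;> simp [hkiff, hk]
    | some abp =>
      obtain ⟨ap, bp⟩ := abp
      have hf2 : PySem.Chars.find pattern.toList [':'] = (ap.length : Int) := by
        rw [find_splitFirst, hcp]
      obtain ⟨hsl1, hsl2⟩ := slice_of_splitFirst ':' pattern.toList ap bp hcp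
      have hnnp : ¬ ((ap.length : Int) < 0) := by omega
      have hkiff : (tag = String.ofList ap) ↔ (tag.toList = ap) := by
        rw [String.ext_iff]; simp
      simp only [hcolon, hf1, hf2, hsl1, hsl2]
      by_cases hk : tag.toList = ap
      · by_cases hbp : bp = []
        · subst hbp
          simp [hnnp, hkiff, hk, levelsOf]
        · simp only [levelsOf, if_neg hbp]
          simp [hnnp, hkiff, hk, levelsMap_ne_nil, levelsMap_ne_none_singleton,
            pyMatchLevels_eq_from, pyMatchFrom_nil_star, hbp]
          rfl
      · simp [hnnp, hkiff, hk]
  | some abt =>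
    obtain ⟨at', bt⟩ := abt
    have hf1 : PySem.Chars.find tag.toList [':'] = (at'.length : Int) := by
      rw [find_splitFirst, hct]
    obtain ⟨hslt1, hslt2⟩ := slice_of_splitFirst ':' tag.toList at' bt hct
    have hnnt : ¬ ((at'.length : Int) < 0) := by omega
    cases hcp : splitFirst ':' pattern.toList with
    | none =>
      have hf2 : PySem.Chars.find pattern.toList [':'] = -1 := by
        rw [find_splitFirst, hcp]
      have hkiff : (String.ofList at' = pattern) ↔ (at' = pattern.toList) := by
        rw [String.ext_iff]; simp
      simp only [hcolon, hf1, hf2, hslt1, hslt2]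
      by_cases hk : at' = pattern.toList <;> simp [hnnt, hkiff, hk]
    | some abp =>
      obtain ⟨ap, bp⟩ := abp
      have hf2 : PySem.Chars.find pattern.toList [':'] = (ap.length : Int) := by
        rw [find_splitFirst, hcp]
      obtain ⟨hslp1, hslp2⟩ := slice_of_splitFirst ':' pattern.toList ap bp hcp
      have hnnp : ¬ ((ap.length : Int) < 0) := by omega
      have hkiff : (String.ofList at' = String.ofList ap) ↔ (at' = ap) := ofList_inj at' ap
      simp only [hcolon, hf1, hf2, hslt1, hslt2, hslp1, hslp2]
      by_cases hk : at' = ap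
      · by_cases hbp : bp = []
        · subst hbp
          simp [hnnt, hnnp, hkiff, hk, levelsOf]
        · by_cases hbt : bt = []
          · subst hbt
            simp only [levelsOf, if_neg hbp, if_pos rfl]
            simp [hnnt, hnnp, hkiff, hk, levelsMap_ne_nil, levelsMap_ne_none_singleton,
              pyMatchLevels_eq_from, pyMatchFrom_nil_star, hbp]
            rfl
          · have hwalk : walkB bp bt = pyMatchFrom (levelsMap bp) (levelsMap bt) :=
              walkB_eq_from (bp.length + 1) bp bt (by omega)
            simp only [levelsOf, if_neg hbp, if_neg hbt]
            simp [hnnt, hnnp, hkiff, hk, levelsMap_ne_nil, levelsMap_ne_none_singleton,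
              pyMatchLevels_eq_from, hwalk, hbp, hbt]
      · simp [hnnt, hnnp, hkiff, hk]
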